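-- pv_equiv track=rewrite | github.com/fmulato/Material | week10/bad_refactoring_v4.py | process_loops
-- ===== SOURCE A (Python) =====
-- def process_loops(lines: list[str]) -> dict:
--     """Counts the occurrences of different loop types in a list of lines.
--
--     Args:
--         lines: A list of strings, where each string represents a line of code.
--
--     Returns:
--         A dictionary containing the counts of each loop type.
--     """
--     loop_counts = {"for": 0, "while": 0, "if": 0}
--     for line in lines:
--         line = line.strip()
--         for loop_type in loop_counts:
--             if line.startswith(loop_type):
--                 loop_counts[loop_type] += 1
--                 break  # Count a line only for one loop type
--     return loop_counts
-- ===== SOURCE B (Python) =====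
-- def process_loops(lines: list[str]) -> dict:
--     """Counts the occurrences of different loop types in a list of lines."""
--     return {kw: sum(1 for line in lines if line.strip().startswith(kw))
--             for kw in ("for", "while", "if")}
-- ===== Notes on version B (the rewrite author's own statement) =====
-- stated objective: idiomatic
-- what changed: Replaces the single interleaved scan with a mutable dict and an inner keyword loop with break by a dict comprehension doing one independent counting pass per keyword; safe because no stripped line can start with two of the keywords.
import Mathlib
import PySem

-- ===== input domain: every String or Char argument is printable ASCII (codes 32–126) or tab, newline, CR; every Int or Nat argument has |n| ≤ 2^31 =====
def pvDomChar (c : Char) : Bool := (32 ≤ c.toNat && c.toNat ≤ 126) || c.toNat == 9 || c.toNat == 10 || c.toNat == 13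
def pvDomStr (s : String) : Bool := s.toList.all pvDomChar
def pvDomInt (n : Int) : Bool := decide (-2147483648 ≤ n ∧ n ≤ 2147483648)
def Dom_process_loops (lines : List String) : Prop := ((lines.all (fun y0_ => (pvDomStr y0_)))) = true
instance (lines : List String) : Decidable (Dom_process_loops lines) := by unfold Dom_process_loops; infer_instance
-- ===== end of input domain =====

-- B replaces A's single interleaved pass (mutable dict, inner keyword loop with break)
-- by one independent counting pass per keyword (a dict comprehension); same cost, more idiomatic.

-- ===== PORT A =====
-- literal dict {"for": a, "while": b, "if": c}
def pvMkD (a b c : Int) : PySem.Dict String Int :=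
  PySem.Dict.mk [("for", a), ("while", b), ("if", c)]

-- 'for loop_type in loop_counts: if line.startswith(loop_type): loop_counts[loop_type] += 1; break'
def pvInner (s : String) : List String → PySem.Dict String Int → PySem.Dict String Int
  | [], d => d
  | k :: ks, d =>
    if PySem.Str.startswith s k then d.modify k 0 (· + 1) else pvInner s ks d

-- one iteration of the outer 'for line in lines' loop
def pvStep (d : PySem.Dict String Int) (line : String) : PySem.Dict String Int :=
  pvInner (PySem.Str.strip line) d.keys d

def process_loops (lines : List String) : List (String × Int) :=
  (lines.foldl pvStep (pvMkD 0 0 0)).items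

-- ===== PORT B =====
-- sum(1 for line in lines if line.strip().startswith(kw))
def pvKwCount (lines : List String) (kw : String) : Int :=
  ((lines.countP (fun line => PySem.Str.startswith (PySem.Str.strip line) kw) : Nat) : Int)

def process_loops_alt (lines : List String) : List (String × Int) :=
  ["for", "while", "if"].map (fun kw => (kw, pvKwCount lines kw))

-- ===== PRECONDITION & SPEC =====
def Spec_process_loops (lines : List String) (out : List (String × Int)) : Prop := out = process_loops_alt lines
instance (lines : List String) (out : List (String × Int)) : Decidable (Spec_process_loops lines out) := by unfold Spec_process_loops; infer_instance

-- ===== CLAIM (what is proved, stated in full; the proofs are below) =====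
def Claim_equal_process_loops : Prop := ∀ (lines : List String), Dom_process_loops lines → Spec_process_loops lines (process_loops lines)

-- ===== LEMMAS AND PROOFS =====

-- no stripped line can start with two different keywords: the first characters differ
lemma pv_chars_excl {c1 c2 : Char} {p1 p2 l : List Char} (hne : c1 ≠ c2)
    (h : PySem.Chars.startswith l (c1 :: p1) = true) :
    PySem.Chars.startswith l (c2 :: p2) = false := by
  rw [PySem.Chars.startswith_iff] at h
  rw [Bool.eq_false_iff, Ne, PySem.Chars.startswith_iff]
  intro h2
  obtain ⟨t1, e1⟩ := h
  obtain ⟨t2, e2⟩ := h2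
  have e := e1.trans e2.symm
  simp only [List.cons_append, List.cons.injEq] at e
  exact hne e.1

lemma pv_excl_fw (s : String) (h : PySem.Str.startswith s "for" = true) :
    PySem.Str.startswith s "while" = false := by
  rw [PySem.Str.startswith_eq] at h ⊢
  rw [show "for".toList = ['f','o','r'] from rfl] at h
  rw [show "while".toList = ['w','h','i','l','e'] from rfl]
  exact pv_chars_excl (by decide) h

lemma pv_excl_fi (s : String) (h : PySem.Str.startswith s "for" = true) :
    PySem.Str.startswith s "if" = false := by
  rw [PySem.Str.startswith_eq] at h ⊢
  rw [show "for".toList = ['f','o','r'] from rfl] at h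
  rw [show "if".toList = ['i','f'] from rfl]
  exact pv_chars_excl (by decide) h

lemma pv_excl_wi (s : String) (h : PySem.Str.startswith s "while" = true) :
    PySem.Str.startswith s "if" = false := by
  rw [PySem.Str.startswith_eq] at h ⊢
  rw [show "while".toList = ['w','h','i','l','e'] from rfl] at h
  rw [show "if".toList = ['i','f'] from rfl]
  exact pv_chars_excl (by decide) h

lemma pvKwCount_cons (kw : String) (l : String) (ls : List String) :
    pvKwCount (l :: ls) kw =
      pvKwCount ls kw + (if PySem.Str.startswith (PySem.Str.strip l) kw then 1 else 0) := by
  simp only [pvKwCount, List.countP_cons]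
  split <;> push_cast <;> ring

lemma pvModify_for (a b c : Int) : (pvMkD a b c).modify "for" 0 (· + 1) = pvMkD (a + 1) b c := by
  simp [pvMkD, PySem.Dict.modify, PySem.Dict.insert, PySem.Dict.getD, PySem.Dict.get?,
    PySem.Dict.contains]

lemma pvModify_while (a b c : Int) : (pvMkD a b c).modify "while" 0 (· + 1) = pvMkD a (b + 1) c := by
  simp [pvMkD, PySem.Dict.modify, PySem.Dict.insert, PySem.Dict.getD, PySem.Dict.get?,
    PySem.Dict.contains]

lemma pvModify_if (a b c : Int) : (pvMkD a b c).modify "if" 0 (· + 1) = pvMkD a b (c + 1) := by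
  simp [pvMkD, PySem.Dict.modify, PySem.Dict.insert, PySem.Dict.getD, PySem.Dict.get?,
    PySem.Dict.contains]

lemma pvKeys_mkD (a b c : Int) : (pvMkD a b c).keys = ["for", "while", "if"] := by
  simp [pvMkD]

-- the loop invariant: folding A's step over lines adds the per-keyword counts
lemma pv_foldl_items (lines : List String) : ∀ (a b c : Int),
    (lines.foldl pvStep (pvMkD a b c)).items =
      [("for", a + pvKwCount lines "for"), ("while", b + pvKwCount lines "while"),
       ("if", c + pvKwCount lines "if")] := by
  induction lines with
  | nil => intro a b c; simp [pvKwCount, pvMkD]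
  | cons l ls ih =>
    intro a b c
    have hstep : pvStep (pvMkD a b c) l =
        (if PySem.Str.startswith (PySem.Str.strip l) "for" then pvMkD (a + 1) b c
         else if PySem.Str.startswith (PySem.Str.strip l) "while" then pvMkD a (b + 1) c
         else if PySem.Str.startswith (PySem.Str.strip l) "if" then pvMkD a b (c + 1)
         else pvMkD a b c) := by
      rw [pvStep, pvKeys_mkD]
      simp only [pvInner]
      split_ifs with h1 h2 h3 <;>
        simp [pvModify_for, pvModify_while, pvModify_if]
    rw [List.foldl_cons, hstep]
    by_cases h1 : PySem.Str.startswith (PySem.Str.strip l) "for" = true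
    · have h2 := pv_excl_fw _ h1
      have h3 := pv_excl_fi _ h1
      rw [if_pos h1, ih]
      rw [show pvKwCount (l :: ls) "for" = pvKwCount ls "for" + 1 from by
            rw [pvKwCount_cons, if_pos h1],
          show pvKwCount (l :: ls) "while" = pvKwCount ls "while" from by
            rw [pvKwCount_cons, if_neg (by rw [h2]; decide), add_zero],
          show pvKwCount (l :: ls) "if" = pvKwCount ls "if" from by
            rw [pvKwCount_cons, if_neg (by rw [h3]; decide), add_zero],
          show a + (pvKwCount ls "for" + 1) = a + 1 + pvKwCount ls "for" from by ring]
    · by_cases h2 : PySem.Str.startswith (PySem.Str.strip l) "while" = true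
      · have h3 := pv_excl_wi _ h2
        rw [if_neg h1, if_pos h2, ih]
        rw [show pvKwCount (l :: ls) "for" = pvKwCount ls "for" from by
              rw [pvKwCount_cons, if_neg h1, add_zero],
            show pvKwCount (l :: ls) "while" = pvKwCount ls "while" + 1 from by
              rw [pvKwCount_cons, if_pos h2],
            show pvKwCount (l :: ls) "if" = pvKwCount ls "if" from by
              rw [pvKwCount_cons, if_neg (by rw [h3]; decide), add_zero],
            show b + (pvKwCount ls "while" + 1) = b + 1 + pvKwCount ls "while" from by ring]
      · by_cases h3 : PySem.Str.startswith (PySem.Str.strip l) "if" = true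
        · rw [if_neg h1, if_neg h2, if_pos h3, ih]
          rw [show pvKwCount (l :: ls) "for" = pvKwCount ls "for" from by
                rw [pvKwCount_cons, if_neg h1, add_zero],
              show pvKwCount (l :: ls) "while" = pvKwCount ls "while" from by
                rw [pvKwCount_cons, if_neg h2, add_zero],
              show pvKwCount (l :: ls) "if" = pvKwCount ls "if" + 1 from by
                rw [pvKwCount_cons, if_pos h3],
              show c + (pvKwCount ls "if" + 1) = c + 1 + pvKwCount ls "if" from by ring]
        · rw [if_neg h1, if_neg h2, if_neg h3, ih]
          rw [show pvKwCount (l :: ls) "for" = pvKwCount ls "for" from by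
                rw [pvKwCount_cons, if_neg h1, add_zero],
              show pvKwCount (l :: ls) "while" = pvKwCount ls "while" from by
                rw [pvKwCount_cons, if_neg h2, add_zero],
              show pvKwCount (l :: ls) "if" = pvKwCount ls "if" from by
                rw [pvKwCount_cons, if_neg h3, add_zero]]

-- ===== VERDICT (by name: the statement is the Claim_ definition above) =====
theorem process_loops_spec : Claim_equal_process_loops := by
  intro lines _
  show process_loops lines = process_loops_alt lines
  rw [process_loops, pv_foldl_items lines 0 0 0]
  simp [process_loops_alt]
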